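-- pv_equiv track=rewrite | github.com/COLAB2/midca | midca/domains/minecraft/PDDL_util.py | parenthetic_contents
-- ===== SOURCE A (Python) =====
-- def parenthetic_contents(string):
--     """Generate parenthesized contents in string as pairs (level, contents)."""
--     stack = []
--     for i, c in enumerate(string):
--         if c == '(':
--             stack.append(i)
--         elif c == ')' and stack:
--             start = stack.pop()
--             yield (len(stack), string[start + 1: i])
-- ===== SOURCE B (Python) =====
-- def parenthetic_contents(string):
--     """Generate parenthesized contents in string as pairs (level, contents)."""
--     stack = []  # stack of partial contents strings, one per currently open '('
--     for c in string:
--         if c == '(':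
--             stack.append('')
--         elif c == ')' and stack:
--             contents = stack.pop()
--             yield (len(stack), contents)
--             if stack:
--                 stack[-1] += '(' + contents + ')'
--         elif stack:
--             stack[-1] += c
-- ===== Notes on version B (the rewrite author's own statement) =====
-- stated objective: alternative
-- what changed: B keeps a stack of incrementally built content strings instead of a stack of start indices, so each region's text is accumulated character by character (re-wrapping closed children into the parent) rather than recovered by slicing the original string at pop time.
import Mathlib
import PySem

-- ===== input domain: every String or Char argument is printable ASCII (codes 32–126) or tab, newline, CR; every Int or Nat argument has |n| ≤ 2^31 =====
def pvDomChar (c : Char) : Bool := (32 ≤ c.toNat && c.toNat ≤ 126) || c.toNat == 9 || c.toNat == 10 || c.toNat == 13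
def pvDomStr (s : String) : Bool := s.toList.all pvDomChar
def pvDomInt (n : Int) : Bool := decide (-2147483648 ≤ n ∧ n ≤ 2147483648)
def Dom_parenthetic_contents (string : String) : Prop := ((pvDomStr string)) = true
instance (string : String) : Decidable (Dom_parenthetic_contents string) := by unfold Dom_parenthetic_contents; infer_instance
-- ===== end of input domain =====

-- B replaces A's stack of start indices (plus slicing at pop time) by a stack of
-- incrementally built content strings (alternative decomposition, same cost).


-- ===== PORT A =====
-- loop of A: 'for i, c in enumerate(string)' with a stack of start indices;
-- on ')' with a non-empty stack, pop and yield (len(stack), string[start+1:i]).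
def pcA_loop (L : List Char) : List Char → Nat → List Nat → List (Int × String) → List (Int × String)
  | [], _, _, out => out
  | c :: rest, i, stack, out =>
    if c = '(' then
      pcA_loop L rest (i + 1) (i :: stack) out
    else if c = ')' then
      match stack with
      | [] => pcA_loop L rest (i + 1) [] out
      | start :: stack' =>
        pcA_loop L rest (i + 1) stack'
          (out ++ [((stack'.length : Int),
            String.ofList (PySem.List.slice L (some ((start : Int) + 1)) (some (i : Int))))])
    else
      pcA_loop L rest (i + 1) stack out

def parenthetic_contents (string : String) : List (Int × String) :=
  pcA_loop string.toList string.toList 0 [] []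

-- ===== PORT B =====
-- loop of B: 'for c in string' with a stack of partial contents (head = top of stack);
-- on ')' pop, yield the accumulated contents, and re-wrap them into the parent.
def pcB_loop : List Char → List (List Char) → List (Int × String) → List (Int × String)
  | [], _, out => out
  | c :: rest, stack, out =>
    if c = '(' then
      pcB_loop rest ([] :: stack) out
    else if c = ')' then
      match stack with
      | [] => pcB_loop rest [] out
      | contents :: stack' =>
        let out' := out ++ [((stack'.length : Int), String.ofList contents)]
        match stack' with
        | [] => pcB_loop rest [] out'
        | parent :: stack'' =>
          pcB_loop rest ((parent ++ '(' :: contents ++ [')']) :: stack'') out'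
    else
      match stack with
      | [] => pcB_loop rest [] out
      | top :: stack' => pcB_loop rest ((top ++ [c]) :: stack') out

def parenthetic_contents_alt (string : String) : List (Int × String) :=
  pcB_loop string.toList [] []

-- ===== PRECONDITION & SPEC =====
def Spec_parenthetic_contents (string : String) (out : List (Int × String)) : Prop := out = parenthetic_contents_alt string
instance (string : String) (out : List (Int × String)) : Decidable (Spec_parenthetic_contents string out) := by unfold Spec_parenthetic_contents; infer_instance

-- ===== CLAIM (what is proved, stated in full; the proofs are below) =====
def Claim_equal_parenthetic_contents : Prop := ∀ (string : String), Dom_parenthetic_contents string → Spec_parenthetic_contents string (parenthetic_contents string)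

-- ===== LEMMAS AND PROOFS =====

/-- Invariant relating A's index stack to B's accumulator stack after the first `i`
characters of `L` have been processed: the top accumulator holds the text between its
'(' and position `i`; each deeper accumulator holds the text between its '(' and the
'(' of the entry above it. -/
def pcInv (L : List Char) : Nat → List Nat → List (List Char) → Prop
  | _, [], [] => True
  | i, j :: As, b :: Bs =>
      j < i ∧ L[j]? = some '(' ∧ b = (L.drop (j + 1)).take (i - (j + 1)) ∧ pcInv L j As Bs
  | _, _ :: _, [] => False
  | _, [], _ :: _ => False

lemma pcInv_length {L : List Char} : ∀ {i As Bs}, pcInv L i As Bs → As.length = Bs.length := by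
  intro i As Bs h
  induction As generalizing i Bs with
  | nil => cases Bs with
    | nil => rfl
    | cons b Bs => exact absurd h (by simp [pcInv])
  | cons j As ih =>
    cases Bs with
    | nil => exact absurd h (by simp [pcInv])
    | cons b Bs =>
      obtain ⟨_, _, _, htail⟩ := h
      simpa using ih htail

lemma slice_take_succ {L : List Char} {m i : Nat} (hm : m ≤ i) (hc : L[i]? = some c) :
    (L.drop m).take (i + 1 - m) = (L.drop m).take (i - m) ++ [c] := by
  obtain ⟨hi, -⟩ := List.getElem?_eq_some_iff.mp hc
  have h1 : i + 1 - m = (i - m) + 1 := by omega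
  rw [h1, List.take_add_one]
  have : (L.drop m)[i - m]? = some c := by
    rw [List.getElem?_drop]
    rwa [Nat.add_sub_cancel' hm]
  simp [this]

/-- Slice split: the text from `m` to `i` is the text from `m` to `j`, then `L[j]`,
then the text from `j+1` to `i`. -/
lemma slice_split {L : List Char} {m j i : Nat} (h1 : m ≤ j) (h2 : j < i)
    (hj : L[j]? = some cj) :
    (L.drop m).take (i - m) =
      (L.drop m).take (j - m) ++ cj :: (L.drop (j + 1)).take (i - (j + 1)) := by
  induction i with
  | zero => omega
  | succ i ih =>
    by_cases hji : j < i
    · by_cases hi : i < L.length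
      · obtain ⟨c, hc⟩ : ∃ c, L[i]? = some c := ⟨L[i], List.getElem?_eq_getElem hi⟩
        rw [slice_take_succ (by omega) hc, slice_take_succ (by omega) hc, ih hji]
        simp
      · -- i ≥ L.length : both takes saturate
        have hlen : L.length ≤ i := by omega
        have e1 : (L.drop m).take (i + 1 - m) = (L.drop m).take (i - m) := by
          rw [List.take_of_length_le (by simp; omega), List.take_of_length_le (by simp; omega)]
        have e2 : (L.drop (j + 1)).take (i + 1 - (j + 1)) = (L.drop (j + 1)).take (i - (j + 1)) := by
          obtain ⟨hjlen, -⟩ := List.getElem?_eq_some_iff.mp hj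
          rw [List.take_of_length_le (by simp; omega), List.take_of_length_le (by simp; omega)]
        rw [e1, e2, ih hji]
    · -- i = j
      have hij : i = j := by omega
      subst hij
      rw [slice_take_succ (by omega) hj]
      simp

lemma pcA_slice_eq {L : List Char} (j i : Nat) :
    PySem.List.slice L (some ((j : Int) + 1)) (some (i : Int)) = (L.drop (j + 1)).take (i - (j + 1)) := by
  have : ((j : Int) + 1) = ((j + 1 : Nat) : Int) := by push_cast; ring
  rw [this, PySem.List.slice_natCast]

lemma pcMain {L : List Char} : ∀ (rest : List Char) (i : Nat) As Bs out,
    rest = L.drop i → pcInv L i As Bs →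
    pcA_loop L rest i As out = pcB_loop rest Bs out := by
  intro rest
  induction rest with
  | nil => intro i As Bs out _ _; rfl
  | cons c rest' ih =>
    intro i As Bs out hrest hinv
    have hi : i < L.length := by
      by_contra h
      rw [List.drop_of_length_le (by omega)] at hrest
      simp at hrest
    have hci : L[i]? = some c := by
      have := congrArg (·[0]?) hrest
      simpa [List.getElem?_drop] using this.symm
    have hrest' : rest' = L.drop (i + 1) := by
      have := congrArg List.tail hrest
      simpa [List.tail_drop] using this
    by_cases hpar : c = '('
    · subst hpar
      have hstep : pcInv L (i + 1) (i :: As) ([] :: Bs) := by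
        cases As with
        | nil =>
          cases Bs with
          | nil => exact ⟨by omega, hci, by simp, trivial⟩
          | cons b Bs => exact absurd hinv (by simp [pcInv])
        | cons j As' =>
          cases Bs with
          | nil => exact absurd hinv (by simp [pcInv])
          | cons b Bs' => exact ⟨by omega, hci, by simp, hinv⟩
      simp only [pcA_loop, pcB_loop]
      exact ih (i + 1) _ _ out hrest' hstep
    · by_cases hclo : c = ')'
      · subst hclo
        cases As with
        | nil =>
          cases Bs with
          | nil =>
            simp only [pcA_loop, pcB_loop, if_neg hpar]
            exact ih (i + 1) [] [] out hrest' trivial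
          | cons b Bs => exact absurd hinv (by simp [pcInv])
        | cons j As' =>
          cases Bs with
          | nil => exact absurd hinv (by simp [pcInv])
          | cons b Bs' =>
            obtain ⟨hji, hjp, hb, htail⟩ := hinv
            have hlen : As'.length = Bs'.length := pcInv_length htail
            have hout : out ++ [((As'.length : Int),
                String.ofList (PySem.List.slice L (some ((j : Int) + 1)) (some (i : Int))))]
                = out ++ [((Bs'.length : Int), String.ofList b)] := by
              rw [hlen, pcA_slice_eq, hb]
            cases As' with
            | nil =>
              cases Bs' with
              | nil =>
                simp only [pcA_loop, pcB_loop, if_neg hpar]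
                rw [hout]
                exact ih (i + 1) [] [] _ hrest' trivial
              | cons p Bs'' => exact absurd htail (by simp [pcInv])
            | cons j2 As'' =>
              cases Bs' with
              | nil => exact absurd htail (by simp [pcInv])
              | cons p Bs'' =>
                obtain ⟨hj2j, hj2p, hp, htail2⟩ := htail
                have hstep : pcInv L (i + 1) (j2 :: As'')
                    ((p ++ '(' :: b ++ [')']) :: Bs'') := by
                  refine ⟨by omega, hj2p, ?_, htail2⟩
                  rw [slice_take_succ (m := j2 + 1) (by omega) hci,
                      slice_split (m := j2 + 1) (by omega) hji hjp, ← hp, hb]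
                simp only [pcA_loop, pcB_loop, if_neg hpar]
                rw [hout]
                exact ih (i + 1) _ _ _ hrest' hstep
      · cases As with
        | nil =>
          cases Bs with
          | nil =>
            simp only [pcA_loop, pcB_loop, if_neg hpar, if_neg hclo]
            exact ih (i + 1) [] [] out hrest' trivial
          | cons b Bs => exact absurd hinv (by simp [pcInv])
        | cons j As' =>
          cases Bs with
          | nil => exact absurd hinv (by simp [pcInv])
          | cons b Bs' =>
            obtain ⟨hji, hjp, hb, htail⟩ := hinv
            have hstep : pcInv L (i + 1) (j :: As') ((b ++ [c]) :: Bs') := by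
              refine ⟨by omega, hjp, ?_, htail⟩
              rw [slice_take_succ (m := j + 1) (by omega) hci, hb]
            simp only [pcA_loop, pcB_loop, if_neg hpar, if_neg hclo]
            exact ih (i + 1) _ _ out hrest' hstep

-- ===== VERDICT (by name: the statement is the Claim_ definition above) =====
theorem parenthetic_contents_spec : Claim_equal_parenthetic_contents := by
  intro string _
  unfold Spec_parenthetic_contents parenthetic_contents parenthetic_contents_alt
  exact pcMain string.toList 0 [] [] [] (by simp) trivial
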